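-- pv_equiv track=rewrite | github.com/moyasui/Quanthon | Quanthon/exponential.py | no_i_after_pauli
-- ===== SOURCE A (Python) =====
-- def no_i_after_pauli(pauli_str):
--
-- 	detected_p = False
-- 	for op in pauli_str:
-- 		if op != 'I':
-- 			detected_p = True
-- 			continue
--
-- 		if detected_p and op == 'I':
-- 			return False
-- 	return True
-- ===== SOURCE B (Python) =====
-- def no_i_after_pauli(pauli_str):
-- 	return 'I' not in pauli_str.lstrip('I')
-- ===== Notes on version B (the rewrite author's own statement) =====
-- stated objective: idiomatic
-- what changed: Replaced the stateful character-by-character scan with a prefix-strip of the leading 'I' run followed by a membership test on the tail.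
import Mathlib
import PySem

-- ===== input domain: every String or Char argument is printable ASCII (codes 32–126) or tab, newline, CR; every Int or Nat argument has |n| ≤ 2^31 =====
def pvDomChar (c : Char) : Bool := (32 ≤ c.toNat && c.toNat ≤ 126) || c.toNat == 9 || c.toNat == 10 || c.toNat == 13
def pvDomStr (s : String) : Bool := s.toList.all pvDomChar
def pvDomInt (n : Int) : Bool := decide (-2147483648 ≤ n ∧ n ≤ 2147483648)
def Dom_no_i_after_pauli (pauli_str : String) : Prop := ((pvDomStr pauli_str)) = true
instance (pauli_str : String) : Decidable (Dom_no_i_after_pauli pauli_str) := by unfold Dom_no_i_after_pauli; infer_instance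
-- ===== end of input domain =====

-- B replaces A's stateful scan with an lstrip of the leading 'I' run plus a membership test (idiomatic, same cost).

-- ===== PORT A =====
-- the loop of A: `detected` is A's detected_p flag
def noIAfterGo : List Char → Bool → Bool
  | [], _ => true
  | op :: rest, detected =>
    if op ≠ 'I' then noIAfterGo rest true
    else if detected then false
    else noIAfterGo rest detected

def no_i_after_pauli (pauli_str : String) : Bool :=
  noIAfterGo pauli_str.toList false

-- ===== PORT B =====
def no_i_after_pauli_alt (pauli_str : String) : Bool :=
  -- pauli_str.lstrip('I') ported by hand as dropWhile (exact: removes the leading run of 'I')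
  let t := pauli_str.toList.dropWhile (fun c => c == 'I')
  -- 'I' not in t : single-character substring test = membership
  !(PySem.Chars.isIn ['I'] t)

-- ===== PRECONDITION & SPEC =====
def Spec_no_i_after_pauli (pauli_str : String) (out : Bool) : Prop := out = no_i_after_pauli_alt pauli_str
instance (pauli_str : String) (out : Bool) : Decidable (Spec_no_i_after_pauli pauli_str out) := by unfold Spec_no_i_after_pauli; infer_instance

-- ===== CLAIM (what is proved, stated in full; the proofs are below) =====
def Claim_equal_no_i_after_pauli : Prop := ∀ (pauli_str : String), Dom_no_i_after_pauli pauli_str → Spec_no_i_after_pauli pauli_str (no_i_after_pauli pauli_str)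

-- ===== LEMMAS AND PROOFS =====

lemma isIn_singleton (l : List Char) : PySem.Chars.isIn ['I'] l = l.contains 'I' := by
  by_cases h : 'I' ∈ l
  · obtain ⟨s, t, rfl⟩ := List.append_of_mem h
    rw [(PySem.Chars.isIn_iff_infix _ _).2 ⟨s, t, by simp⟩]
    simpa using h
  · have : ¬ (['I'] <:+: l) := fun hinf => h (hinf.subset (by simp))
    rw [(PySem.Chars.isIn_eq_false_iff _ _).2 this]
    simpa using h

lemma go_true (l : List Char) : noIAfterGo l true = !l.contains 'I' := by
  induction l with
  | nil => simp [noIAfterGo]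
  | cons op rest ih =>
    by_cases h : op = 'I'
    · subst h; simp [noIAfterGo]
    · simp [noIAfterGo, h, ih, Ne.symm h]

lemma go_false (l : List Char) :
    noIAfterGo l false = !((l.dropWhile (fun c => c == 'I')).contains 'I') := by
  induction l with
  | nil => simp [noIAfterGo]
  | cons op rest ih =>
    by_cases h : op = 'I'
    · subst h; simpa [noIAfterGo, List.dropWhile] using ih
    · simp [noIAfterGo, h, go_true, Ne.symm h]

-- ===== VERDICT (by name: the statement is the Claim_ definition above) =====
theorem no_i_after_pauli_spec : Claim_equal_no_i_after_pauli := by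
  intro s _
  show no_i_after_pauli s = no_i_after_pauli_alt s
  simp [no_i_after_pauli, no_i_after_pauli_alt, go_false, isIn_singleton]
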